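-- pv_equiv track=rewrite | github.com/bvrln/YogaBenchmark | analysis/pricing_crawl.py | _infer_class_style
-- ===== SOURCE A (Python) =====
-- def _infer_class_style(class_type: str, context: str) -> tuple[str, str]:
--     """
--     Infer detailed class style and intensity level.
--     Returns: (class_style, intensity_level)
--     """
--     lower = context.lower()
--
--     # Yoga styles
--     if class_type in ["yoga", "hot_yoga"]:
--         if any(term in lower for term in ["vinyasa", "flow"]):
--             if any(term in lower for term in ["power", "athletic", "strong"]):
--                 return ("power_yoga", "high")
--             return ("vinyasa_flow", "moderate")
--
--         if any(term in lower for term in ["power", "athletic"]):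
--             return ("power_yoga", "high")
--
--         if any(term in lower for term in ["yin", "restorative", "gentle", "slow"]):
--             return ("yin_restorative", "low")
--
--         if any(term in lower for term in ["bikram", "26+2", "26 postures"]):
--             return ("bikram_26_2", "high")
--
--         if any(term in lower for term in ["ashtanga"]):
--             return ("ashtanga", "moderate")
--
--         if any(term in lower for term in ["hatha"]):
--             return ("hatha", "moderate")
--
--     # Pilates styles
--     if class_type == "pilates":
--         if any(term in lower for term in ["reformer"]):
--             return ("reformer_pilates", "moderate")
--         return ("mat_pilates", "moderate")
--
--     return ("", "")
-- ===== SOURCE B (Python) =====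
-- # B: single left-to-right sweep over the lowered text collects every style keyword
-- # present into a set; the classification is then a pure decision over those flags.
-- _TERMS = ("vinyasa", "flow", "power", "athletic", "strong", "yin", "restorative",
--           "gentle", "slow", "bikram", "26+2", "26 postures", "ashtanga", "hatha",
--           "reformer")
--
-- def _scan_terms(lower):
--     """One pass over the text: at each position record every term starting there."""
--     found = set()
--     for i in range(len(lower)):
--         for t in _TERMS:
--             if t not in found and lower.startswith(t, i):
--                 found.add(t)
--     return found
--
-- def _infer_class_style(class_type: str, context: str) -> tuple[str, str]:
--     found = _scan_terms(context.lower())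
--     if class_type in ("yoga", "hot_yoga"):
--         if "vinyasa" in found or "flow" in found:
--             if "power" in found or "athletic" in found or "strong" in found:
--                 return ("power_yoga", "high")
--             return ("vinyasa_flow", "moderate")
--         if "power" in found or "athletic" in found:
--             return ("power_yoga", "high")
--         if "yin" in found or "restorative" in found or "gentle" in found or "slow" in found:
--             return ("yin_restorative", "low")
--         if "bikram" in found or "26+2" in found or "26 postures" in found:
--             return ("bikram_26_2", "high")
--         if "ashtanga" in found:
--             return ("ashtanga", "moderate")
--         if "hatha" in found:
--             return ("hatha", "moderate")
--     if class_type == "pilates":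
--         if "reformer" in found:
--             return ("reformer_pilates", "moderate")
--         return ("mat_pilates", "moderate")
--     return ("", "")
-- ===== Notes on version B (the rewrite author's own statement) =====
-- stated objective: alternative
-- what changed: Instead of A's term-major chain of fifteen short-circuiting substring searches, B makes one position-major sweep over the lowered context, collecting every keyword that starts at some position into a found-set, and then classifies by a pure decision over those precomputed flags.
import Mathlib
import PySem

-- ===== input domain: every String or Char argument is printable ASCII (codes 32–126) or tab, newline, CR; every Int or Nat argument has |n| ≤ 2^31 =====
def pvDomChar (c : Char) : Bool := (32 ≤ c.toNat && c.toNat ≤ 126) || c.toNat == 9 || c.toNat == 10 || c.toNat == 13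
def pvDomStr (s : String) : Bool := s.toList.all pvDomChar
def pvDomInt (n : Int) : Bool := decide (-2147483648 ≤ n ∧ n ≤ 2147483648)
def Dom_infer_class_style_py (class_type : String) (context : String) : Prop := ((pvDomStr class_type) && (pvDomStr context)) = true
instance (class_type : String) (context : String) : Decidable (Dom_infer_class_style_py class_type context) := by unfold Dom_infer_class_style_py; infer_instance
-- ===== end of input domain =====

-- B replaces A's term-major chain of substring searches by one position-major sweep that
-- collects all keywords present into a set, then decides from those flags (alternative).

-- ===== PORT A =====
def infer_class_style_py (class_type : String) (context : String) : String × String :=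
  let lower := PySem.Str.lower context
  -- the code after the yoga block (falls through to the pilates check and the default)
  let rest : String × String :=
    if class_type = "pilates" then
      if PySem.Str.isIn "reformer" lower then ("reformer_pilates", "moderate")
      else ("mat_pilates", "moderate")
    else ("", "")
  if class_type = "yoga" ∨ class_type = "hot_yoga" then
    if PySem.Str.isIn "vinyasa" lower || PySem.Str.isIn "flow" lower then
      if PySem.Str.isIn "power" lower || PySem.Str.isIn "athletic" lower || PySem.Str.isIn "strong" lower then
        ("power_yoga", "high")
      else ("vinyasa_flow", "moderate")
    else if PySem.Str.isIn "power" lower || PySem.Str.isIn "athletic" lower then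
      ("power_yoga", "high")
    else if PySem.Str.isIn "yin" lower || PySem.Str.isIn "restorative" lower || PySem.Str.isIn "gentle" lower || PySem.Str.isIn "slow" lower then
      ("yin_restorative", "low")
    else if PySem.Str.isIn "bikram" lower || PySem.Str.isIn "26+2" lower || PySem.Str.isIn "26 postures" lower then
      ("bikram_26_2", "high")
    else if PySem.Str.isIn "ashtanga" lower then
      ("ashtanga", "moderate")
    else if PySem.Str.isIn "hatha" lower then
      ("hatha", "moderate")
    else rest
  else rest

-- ===== PORT B =====
-- _TERMS from Source B
def pvTerms : List String :=
  ["vinyasa", "flow", "power", "athletic", "strong", "yin", "restorative",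
   "gentle", "slow", "bikram", "26+2", "26 postures", "ashtanga", "hatha", "reformer"]

-- body of the sweep at one position i: 'for t in _TERMS: if t not in found and lower.startswith(t, i): found.add(t)'
-- (Python's lower.startswith(t, i) with 0 ≤ i is exactly 'Chars.startswith (lower.toList.drop i.toNat) t.toList')
def pvScanStep (lowerL : List Char) (found : PySem.Set String) (i : Int) : PySem.Set String :=
  pvTerms.foldl (fun f t =>
    if (!(PySem.Set.contains f t)) && PySem.Chars.startswith (lowerL.drop i.toNat) t.toList
    then PySem.Set.add f t else f) found

-- _scan_terms from Source B: 'for i in range(len(lower)): …'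
def pvScanTerms (lower : String) : PySem.Set String :=
  (PySem.List.pyRange 0 (PySem.Str.len lower) 1).foldl (pvScanStep lower.toList) PySem.Set.empty

def infer_class_style_py_alt (class_type : String) (context : String) : String × String :=
  let found := pvScanTerms (PySem.Str.lower context)
  -- the code after the yoga block (falls through to the pilates check and the default)
  let rest : String × String :=
    if class_type = "pilates" then
      if PySem.Set.contains found "reformer" then ("reformer_pilates", "moderate")
      else ("mat_pilates", "moderate")
    else ("", "")
  if class_type = "yoga" ∨ class_type = "hot_yoga" then
    if PySem.Set.contains found "vinyasa" || PySem.Set.contains found "flow" then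
      if PySem.Set.contains found "power" || PySem.Set.contains found "athletic" || PySem.Set.contains found "strong" then
        ("power_yoga", "high")
      else ("vinyasa_flow", "moderate")
    else if PySem.Set.contains found "power" || PySem.Set.contains found "athletic" then
      ("power_yoga", "high")
    else if PySem.Set.contains found "yin" || PySem.Set.contains found "restorative" || PySem.Set.contains found "gentle" || PySem.Set.contains found "slow" then
      ("yin_restorative", "low")
    else if PySem.Set.contains found "bikram" || PySem.Set.contains found "26+2" || PySem.Set.contains found "26 postures" then
      ("bikram_26_2", "high")
    else if PySem.Set.contains found "ashtanga" then
      ("ashtanga", "moderate")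
    else if PySem.Set.contains found "hatha" then
      ("hatha", "moderate")
    else rest
  else rest

-- ===== PRECONDITION & SPEC =====
def Spec_infer_class_style_py (class_type : String) (context : String) (out : String × String) : Prop := out = infer_class_style_py_alt class_type context
instance (class_type : String) (context : String) (out : String × String) : Decidable (Spec_infer_class_style_py class_type context out) := by unfold Spec_infer_class_style_py; infer_instance

-- ===== CLAIM (what is proved, stated in full; the proofs are below) =====
def Claim_equal_infer_class_style_py : Prop := ∀ (class_type : String) (context : String), Dom_infer_class_style_py class_type context → Spec_infer_class_style_py class_type context (infer_class_style_py class_type context)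

-- ===== LEMMAS AND PROOFS =====

-- membership after the inner 'for t in _TERMS' loop
lemma pv_foldl_addif_mem (P : String → Bool) (ts : List String) :
    ∀ (f : PySem.Set String) (x : String),
    (x ∈ ts.foldl (fun f t => if (!(PySem.Set.contains f t)) && P t then PySem.Set.add f t else f) f)
      ↔ x ∈ f ∨ (x ∈ ts ∧ P x = true) := by
  induction ts with
  | nil => intro f x; simp
  | cons t ts ih =>
    intro f x
    simp only [List.foldl_cons, ih, List.mem_cons]
    rcases hc : PySem.Set.contains f t with _ | _
    · rcases hp : P t with _ | _
      · simp only [Bool.not_false, Bool.and_false, Bool.false_eq_true, if_false]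
        constructor
        · tauto
        · rintro (h | ⟨(rfl | h), hPx⟩)
          · tauto
          · rw [hp] at hPx; cases hPx
          · tauto
      · simp only [Bool.not_false, Bool.and_true, if_true, PySem.Set.mem_add]
        constructor
        · rintro ((h | rfl) | ⟨h, hPx⟩)
          · tauto
          · exact Or.inr ⟨Or.inl rfl, hp⟩
          · tauto
        · rintro (h | ⟨(rfl | h), hPx⟩)
          · tauto
          · exact Or.inl (Or.inr rfl)
          · tauto
    · have htf : t ∈ f := (PySem.Set.contains_iff f t).mp hc
      simp only [Bool.not_true, Bool.false_and, Bool.false_eq_true, if_false]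
      constructor
      · tauto
      · rintro (h | ⟨(rfl | h), hPx⟩) <;> tauto

-- membership after the outer 'for i in range(len(lower))' loop
lemma pv_scan_mem (L : List Char) (iss : List Int) :
    ∀ (f : PySem.Set String) (x : String),
    (x ∈ iss.foldl (pvScanStep L) f)
      ↔ x ∈ f ∨ (x ∈ pvTerms ∧ ∃ i ∈ iss, PySem.Chars.startswith (L.drop i.toNat) x.toList = true) := by
  induction iss with
  | nil => intro f x; simp
  | cons i iss ih =>
    intro f x
    simp only [List.foldl_cons, ih, List.mem_cons]
    rw [show pvScanStep L f i = _ from rfl, pvScanStep,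
        pv_foldl_addif_mem (fun t => PySem.Chars.startswith (L.drop i.toNat) t.toList) pvTerms f x]
    constructor
    · rintro ((h | ⟨ht, hs⟩) | ⟨ht, j, hj, hs⟩)
      · tauto
      · exact Or.inr ⟨ht, i, Or.inl rfl, hs⟩
      · exact Or.inr ⟨ht, j, Or.inr hj, hs⟩
    · rintro (h | ⟨ht, j, (rfl | hj), hs⟩)
      · tauto
      · exact Or.inl (Or.inr ⟨ht, hs⟩)
      · exact Or.inr ⟨ht, j, hj, hs⟩

-- a term of the table is in the scanned set iff Python's 'term in lower' holds
lemma pv_contains_scan_eq (lower : String) (t : String)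
    (ht : t ∈ pvTerms) (hne : t.toList ≠ []) :
    PySem.Set.contains (pvScanTerms lower) t = PySem.Str.isIn t lower := by
  rw [Bool.eq_iff_iff, PySem.Set.contains_iff, PySem.Str.isIn_iff_infix,
      ← PySem.Chars.isIn_iff_infix, ← PySem.Chars.exists_prefix_drop_iff_isIn]
  rw [pvScanTerms, pv_scan_mem]
  simp only [PySem.Set.empty, List.not_mem_nil, false_or, ht, true_and]
  constructor
  · rintro ⟨i, hi, hs⟩
    exact ⟨i.toNat, (PySem.Chars.startswith_iff _ _).mp hs⟩
  · rintro ⟨j, hpre⟩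
    have hjlt : j < lower.toList.length := by
      have hlen := hpre.length_le
      rw [List.length_drop] at hlen
      have h0 : 0 < t.toList.length := List.length_pos_iff.mpr hne
      omega
    refine ⟨(j : Int), ?_, ?_⟩
    · rw [PySem.List.mem_pyRange_one]
      refine ⟨Int.natCast_nonneg j, ?_⟩
      rw [PySem.Str.len_eq]
      exact_mod_cast hjlt
    · rw [Int.toNat_natCast]
      exact (PySem.Chars.startswith_iff _ _).mpr hpre

-- ===== VERDICT (by name: the statement is the Claim_ definition above) =====
theorem infer_class_style_py_spec : Claim_equal_infer_class_style_py := by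
  intro class_type context _
  unfold Spec_infer_class_style_py
  unfold infer_class_style_py infer_class_style_py_alt
  simp only [pv_contains_scan_eq (PySem.Str.lower context) "vinyasa" (by decide) (by decide),
    pv_contains_scan_eq (PySem.Str.lower context) "flow" (by decide) (by decide),
    pv_contains_scan_eq (PySem.Str.lower context) "power" (by decide) (by decide),
    pv_contains_scan_eq (PySem.Str.lower context) "athletic" (by decide) (by decide),
    pv_contains_scan_eq (PySem.Str.lower context) "strong" (by decide) (by decide),
    pv_contains_scan_eq (PySem.Str.lower context) "yin" (by decide) (by decide),
    pv_contains_scan_eq (PySem.Str.lower context) "restorative" (by decide) (by decide),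
    pv_contains_scan_eq (PySem.Str.lower context) "gentle" (by decide) (by decide),
    pv_contains_scan_eq (PySem.Str.lower context) "slow" (by decide) (by decide),
    pv_contains_scan_eq (PySem.Str.lower context) "bikram" (by decide) (by decide),
    pv_contains_scan_eq (PySem.Str.lower context) "26+2" (by decide) (by decide),
    pv_contains_scan_eq (PySem.Str.lower context) "26 postures" (by decide) (by decide),
    pv_contains_scan_eq (PySem.Str.lower context) "ashtanga" (by decide) (by decide),
    pv_contains_scan_eq (PySem.Str.lower context) "hatha" (by decide) (by decide),
    pv_contains_scan_eq (PySem.Str.lower context) "reformer" (by decide) (by decide)]
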